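-- pv_equiv track=rewrite | github.com/BryceJ98/Bill-Surfer | legislative-assistant/test_report.py | get_status_stepper
-- ===== SOURCE A (Python) =====
-- def get_status_stepper(status_code):
--     """
--     Convert status code to a visual progress indicator.
--     LegiScan status codes: 1=Intro, 2=Engrossed, 3=Enrolled, 4=Passed, 5=Vetoed, 6=Failed
--     """
--     steps = ["Introduced", "Engrossed", "Enrolled", "Passed"]
--
--     # Map status code to step index
--     status_map = {1: 0, 2: 1, 3: 2, 4: 3, 5: 3, 6: 0, 7: 3, 8: 3}
--     status_idx = status_map.get(status_code, 0)
--
--     display_steps = []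
--     for i, step in enumerate(steps):
--         if i < status_idx:
--             # Completed step
--             display_steps.append(f"<font color='#10B981'><b>+ {step}</b></font>")
--         elif i == status_idx:
--             # Current step
--             display_steps.append(f"<font color='#1E40AF'><b>* {step}</b></font>")
--         else:
--             # Future step
--             display_steps.append(f"<font color='#94A3B8'>o {step}</font>")
--
--     return "   &rarr;   ".join(display_steps)
-- ===== SOURCE B (Python) =====
-- def get_status_stepper(status_code):
--     """
--     Convert status code to a visual progress indicator.
--     LegiScan status codes: 1=Intro, 2=Engrossed, 3=Enrolled, 4=Passed, 5=Vetoed, 6=Failed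
--     The stepper has only four possible renderings (one per current-step index),
--     so look the finished string up in a precomputed table.
--     """
--     STEPPERS = [
--         "<font color='#1E40AF'><b>* Introduced</b></font>   &rarr;   <font color='#94A3B8'>o Engrossed</font>   &rarr;   <font color='#94A3B8'>o Enrolled</font>   &rarr;   <font color='#94A3B8'>o Passed</font>",
--         "<font color='#10B981'><b>+ Introduced</b></font>   &rarr;   <font color='#1E40AF'><b>* Engrossed</b></font>   &rarr;   <font color='#94A3B8'>o Enrolled</font>   &rarr;   <font color='#94A3B8'>o Passed</font>",
--         "<font color='#10B981'><b>+ Introduced</b></font>   &rarr;   <font color='#10B981'><b>+ Engrossed</b></font>   &rarr;   <font color='#1E40AF'><b>* Enrolled</b></font>   &rarr;   <font color='#94A3B8'>o Passed</font>",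
--         "<font color='#10B981'><b>+ Introduced</b></font>   &rarr;   <font color='#10B981'><b>+ Engrossed</b></font>   &rarr;   <font color='#10B981'><b>+ Enrolled</b></font>   &rarr;   <font color='#1E40AF'><b>* Passed</b></font>",
--     ]
--     status_map = {1: 0, 2: 1, 3: 2, 4: 3, 5: 3, 6: 0, 7: 3, 8: 3}
--     return STEPPERS[status_map.get(status_code, 0)]
-- ===== Notes on version B (the rewrite author's own statement) =====
-- stated objective: alternative
-- what changed: Replaces the per-step rendering loop with a precomputed table of the four possible finished stepper strings, indexed by the status_map lookup: no loop, no joining, a single table lookup.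
import Mathlib
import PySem

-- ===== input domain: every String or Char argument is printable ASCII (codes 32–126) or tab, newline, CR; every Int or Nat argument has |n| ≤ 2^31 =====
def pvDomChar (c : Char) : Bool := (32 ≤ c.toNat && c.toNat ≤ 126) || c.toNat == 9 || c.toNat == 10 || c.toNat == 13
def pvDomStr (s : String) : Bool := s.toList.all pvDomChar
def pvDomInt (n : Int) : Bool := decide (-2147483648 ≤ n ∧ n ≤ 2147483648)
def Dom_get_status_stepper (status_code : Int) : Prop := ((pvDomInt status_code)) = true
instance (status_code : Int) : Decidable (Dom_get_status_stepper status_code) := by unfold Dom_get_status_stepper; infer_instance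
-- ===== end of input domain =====

-- B replaces A's per-step rendering loop by a precomputed table of the four possible
-- finished stepper strings, indexed by the same status_map lookup: no loop, no join.

-- ===== PORT A =====
def get_status_stepper (status_code : Int) : String :=
  let steps : List String := ["Introduced", "Engrossed", "Enrolled", "Passed"]
  let status_map : PySem.Dict Int Int :=
    PySem.Dict.ofList [(1, 0), (2, 1), (3, 2), (4, 3), (5, 3), (6, 0), (7, 3), (8, 3)]
  let status_idx := status_map.getD status_code 0
  let display_steps :=
    (PySem.List.enumerate steps).foldl (fun acc p =>
      if p.1 < status_idx then
        acc ++ ["<font color='#10B981'><b>+ " ++ p.2 ++ "</b></font>"]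
      else if p.1 = status_idx then
        acc ++ ["<font color='#1E40AF'><b>* " ++ p.2 ++ "</b></font>"]
      else
        acc ++ ["<font color='#94A3B8'>o " ++ p.2 ++ "</font>"]) []
  PySem.Str.join "   &rarr;   " display_steps

-- ===== PORT B =====
def get_status_stepper_alt (status_code : Int) : String :=
  let STEPPERS : List String := [
    "<font color='#1E40AF'><b>* Introduced</b></font>   &rarr;   <font color='#94A3B8'>o Engrossed</font>   &rarr;   <font color='#94A3B8'>o Enrolled</font>   &rarr;   <font color='#94A3B8'>o Passed</font>",
    "<font color='#10B981'><b>+ Introduced</b></font>   &rarr;   <font color='#1E40AF'><b>* Engrossed</b></font>   &rarr;   <font color='#94A3B8'>o Enrolled</font>   &rarr;   <font color='#94A3B8'>o Passed</font>",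
    "<font color='#10B981'><b>+ Introduced</b></font>   &rarr;   <font color='#10B981'><b>+ Engrossed</b></font>   &rarr;   <font color='#1E40AF'><b>* Enrolled</b></font>   &rarr;   <font color='#94A3B8'>o Passed</font>",
    "<font color='#10B981'><b>+ Introduced</b></font>   &rarr;   <font color='#10B981'><b>+ Engrossed</b></font>   &rarr;   <font color='#10B981'><b>+ Enrolled</b></font>   &rarr;   <font color='#1E40AF'><b>* Passed</b></font>"]
  let status_map : PySem.Dict Int Int :=
    PySem.Dict.ofList [(1, 0), (2, 1), (3, 2), (4, 3), (5, 3), (6, 0), (7, 3), (8, 3)]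
  -- STEPPERS[idx]: pyGet? is exact; idx is always 0..3 here so the none branch is unreachable
  (PySem.List.pyGet? STEPPERS (status_map.getD status_code 0)).getD ""

-- ===== PRECONDITION & SPEC =====
def Spec_get_status_stepper (status_code : Int) (out : String) : Prop := out = get_status_stepper_alt status_code
instance (status_code : Int) (out : String) : Decidable (Spec_get_status_stepper status_code out) := by unfold Spec_get_status_stepper; infer_instance

-- ===== CLAIM (what is proved, stated in full; the proofs are below) =====
def Claim_equal_get_status_stepper : Prop := ∀ (status_code : Int), Dom_get_status_stepper status_code → Spec_get_status_stepper status_code (get_status_stepper status_code)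

-- ===== LEMMAS AND PROOFS =====

-- the status_map lookup can only produce 0, 1, 2 or 3
lemma pv_idx_cases (c : Int) :
    (PySem.Dict.ofList [((1:Int), (0:Int)), (2, 1), (3, 2), (4, 3), (5, 3), (6, 0), (7, 3), (8, 3)]).getD c 0 = 0 ∨
    (PySem.Dict.ofList [((1:Int), (0:Int)), (2, 1), (3, 2), (4, 3), (5, 3), (6, 0), (7, 3), (8, 3)]).getD c 0 = 1 ∨
    (PySem.Dict.ofList [((1:Int), (0:Int)), (2, 1), (3, 2), (4, 3), (5, 3), (6, 0), (7, 3), (8, 3)]).getD c 0 = 2 ∨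
    (PySem.Dict.ofList [((1:Int), (0:Int)), (2, 1), (3, 2), (4, 3), (5, 3), (6, 0), (7, 3), (8, 3)]).getD c 0 = 3 := by
  by_cases h1 : c = 1; · subst h1; decide
  by_cases h2 : c = 2; · subst h2; decide
  by_cases h3 : c = 3; · subst h3; decide
  by_cases h4 : c = 4; · subst h4; decide
  by_cases h5 : c = 5; · subst h5; decide
  by_cases h6 : c = 6; · subst h6; decide
  by_cases h7 : c = 7; · subst h7; decide
  by_cases h8 : c = 8; · subst h8; decide
  -- c is not a key: the lookup misses and the default 0 is returned
  have hitems : (PySem.Dict.ofList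
      [((1:Int), (0:Int)), (2, 1), (3, 2), (4, 3), (5, 3), (6, 0), (7, 3), (8, 3)]).items =
      [((1:Int), (0:Int)), (2, 1), (3, 2), (4, 3), (5, 3), (6, 0), (7, 3), (8, 3)] := by decide
  have hnone : List.find? (fun p => p.1 == c)
      [((1:Int), (0:Int)), (2, 1), (3, 2), (4, 3), (5, 3), (6, 0), (7, 3), (8, 3)] = none := by
    rw [List.find?_eq_none]
    intro x hx
    fin_cases hx <;> simp <;> omega
  left
  simp [PySem.Dict.getD, PySem.Dict.get?, hitems, hnone]

-- ===== VERDICT (by name: the statement is the Claim_ definition above) =====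
set_option maxRecDepth 4000 in
theorem get_status_stepper_spec : Claim_equal_get_status_stepper := by
  intro c _
  show get_status_stepper c = get_status_stepper_alt c
  rcases pv_idx_cases c with h | h | h | h <;>
    simp only [get_status_stepper, get_status_stepper_alt, h] <;> rfl
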